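-- pv_equiv track=rewrite | github.com/ahmed23-m/automata_practical_exam_4420 | build/lib/Programs/DFA.py | DFA_Divisible_By_Three
-- ===== SOURCE A (Python) =====
-- def DFA_Divisible_By_Three(input_Str: str) -> str:
--     # Starting State
--     state = 0
--     for c in input_Str:
--         if c == '1':
--             # Match Each [divisible_By] Ones
--             state = (state + 1) % 3
--         elif c != '0':
--             return "Invalid Character Is Inserted"  # Invalid Character
--     # Check If the Input String is Divisable (Reachs a Final State)
--     return "Accepted" if state == 0 else "Rejected"
-- ===== SOURCE B (Python) =====
-- def DFA_Divisible_By_Three(input_Str: str) -> str: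
--     # Pass 1: validation only.
--     if any(c not in '01' for c in input_Str):
--         return "Invalid Character Is Inserted"
--     # Pass 2: closed-form acceptance test.
--     return "Accepted" if input_Str.count('1') % 3 == 0 else "Rejected"
-- ===== Notes on version B (the rewrite author's own statement) =====
-- stated objective: simpler
-- what changed: Replaces the fused DFA state loop with two separate passes: a validation scan followed by a ones-count-modulo-three acceptance test.
import Mathlib
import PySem

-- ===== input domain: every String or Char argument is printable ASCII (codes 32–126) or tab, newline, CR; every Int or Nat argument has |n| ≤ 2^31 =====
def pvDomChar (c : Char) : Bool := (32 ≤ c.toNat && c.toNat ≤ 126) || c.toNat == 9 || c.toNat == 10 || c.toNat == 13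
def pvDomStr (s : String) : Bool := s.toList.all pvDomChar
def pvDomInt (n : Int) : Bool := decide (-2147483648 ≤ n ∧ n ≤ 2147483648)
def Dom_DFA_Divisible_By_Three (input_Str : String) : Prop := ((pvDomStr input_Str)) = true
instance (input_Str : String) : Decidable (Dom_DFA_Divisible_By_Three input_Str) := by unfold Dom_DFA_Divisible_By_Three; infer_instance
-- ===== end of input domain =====

-- B separates A's fused DFA loop into a validation pass plus a count('1') % 3 test (objective: simpler).


-- ===== PORT A =====
-- A's for-loop over the characters with its early return, as structural recursion on the same state.
def pvALoop : List Char → Int → String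
  | [], state => if state = 0 then "Accepted" else "Rejected"
  | c :: cs, state =>
    if c = '1' then pvALoop cs (PySem.Int.mod (state + 1) 3)
    else if c ≠ '0' then "Invalid Character Is Inserted"
    else pvALoop cs state

def DFA_Divisible_By_Three (input_Str : String) : String :=
  pvALoop input_Str.toList 0

-- ===== PORT B =====
-- any(c not in '01' …) then input_Str.count('1') % 3; .count of a one-character needle is List.count.
def DFA_Divisible_By_Three_alt (input_Str : String) : String :=
  if input_Str.toList.any (fun c => !(c == '0' || c == '1')) then
    "Invalid Character Is Inserted"
  else if PySem.Int.mod (input_Str.toList.count '1' : Int) 3 = 0 then "Accepted" else "Rejected"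

-- ===== PRECONDITION & SPEC =====
def Spec_DFA_Divisible_By_Three (input_Str : String) (out : String) : Prop := out = DFA_Divisible_By_Three_alt input_Str
instance (input_Str : String) (out : String) : Decidable (Spec_DFA_Divisible_By_Three input_Str out) := by unfold Spec_DFA_Divisible_By_Three; infer_instance

-- ===== CLAIM (what is proved, stated in full; the proofs are below) =====
def Claim_equal_DFA_Divisible_By_Three : Prop := ∀ (input_Str : String), Dom_DFA_Divisible_By_Three input_Str → Spec_DFA_Divisible_By_Three input_Str (DFA_Divisible_By_Three input_Str)

-- ===== LEMMAS AND PROOFS =====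
lemma pvALoop_eq (cs : List Char) (st : Int) (h0 : 0 ≤ st) (h3 : st < 3) :
    pvALoop cs st =
      if cs.any (fun c => !(c == '0' || c == '1')) then "Invalid Character Is Inserted"
      else if (st + (cs.count '1' : Int)) % 3 = 0 then "Accepted" else "Rejected" := by
  induction cs generalizing st with
  | nil =>
    simp only [pvALoop, List.any_nil, List.count_nil, Bool.false_eq_true, if_false,
      Int.natCast_zero, Int.add_zero]
    by_cases hst : st = 0
    · rw [if_pos hst, if_pos (by omega)]
    · rw [if_neg hst, if_neg (by omega)]
  | cons c cs ih =>
    by_cases hc1 : c = '1'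
    · subst hc1
      have hmod : PySem.Int.mod (st + 1) 3 = (st + 1) % 3 :=
        PySem.Int.mod_eq_emod_of_pos (by omega)
      rw [show pvALoop ('1' :: cs) st = pvALoop cs (PySem.Int.mod (st + 1) 3) from by
            simp [pvALoop]]
      rw [hmod, ih ((st + 1) % 3) (by omega) (by omega)]
      have hA : (('1' :: cs).any (fun c => !(c == '0' || c == '1'))) =
          cs.any (fun c => !(c == '0' || c == '1')) := by simp
      have hC : ((('1' :: cs).count '1' : Nat) : Int) = (cs.count '1' : Int) + 1 := by
        simp
      rw [hA, hC]
      by_cases hbad : cs.any (fun c => !(c == '0' || c == '1')) = true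
      · rw [if_pos hbad, if_pos hbad]
      · rw [if_neg hbad, if_neg hbad]
        have hcond : ((st + 1) % 3 + (cs.count '1' : Int)) % 3 = 0 ↔
            (st + ((cs.count '1' : Int) + 1)) % 3 = 0 := by omega
        by_cases hz : ((st + 1) % 3 + (cs.count '1' : Int)) % 3 = 0
        · rw [if_pos hz, if_pos (hcond.mp hz)]
        · rw [if_neg hz, if_neg (fun h => hz (hcond.mpr h))]
    · by_cases hc0 : c = '0'
      · subst hc0
        rw [show pvALoop ('0' :: cs) st = pvALoop cs st from by simp [pvALoop]]
        rw [ih st h0 h3]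
        have hA : (('0' :: cs).any (fun c => !(c == '0' || c == '1'))) =
            cs.any (fun c => !(c == '0' || c == '1')) := by simp
        have hC : ('0' :: cs).count '1' = cs.count '1' := by simp
        rw [hA, hC]
      · have hf : (!(c == '0' || c == '1')) = true := by simp [hc0, hc1]
        have hAny : ((c :: cs).any (fun c => !(c == '0' || c == '1'))) = true := by
          simp only [List.any_cons, hf, Bool.true_or]
        rw [show pvALoop (c :: cs) st = "Invalid Character Is Inserted" from by
              simp [pvALoop, hc1, hc0]]
        rw [if_pos hAny]

-- ===== VERDICT (by name: the statement is the Claim_ definition above) =====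
theorem DFA_Divisible_By_Three_spec : Claim_equal_DFA_Divisible_By_Three := by
  intro s _
  unfold Spec_DFA_Divisible_By_Three DFA_Divisible_By_Three DFA_Divisible_By_Three_alt
  rw [pvALoop_eq s.toList 0 (by omega) (by omega)]
  by_cases hbad : s.toList.any (fun c => !(c == '0' || c == '1')) = true
  · rw [if_pos hbad, if_pos hbad]
  · rw [if_neg hbad, if_neg hbad]
    have hmod : PySem.Int.mod (s.toList.count '1' : Int) 3 = (s.toList.count '1' : Int) % 3 :=
      PySem.Int.mod_eq_emod_of_pos (by omega)
    rw [hmod, Int.zero_add]
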